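-- pv_equiv track=rewrite | github.com/linhdvu14/cp-sols | sols/CodeForces/1808_d2/D_Petya_Petya_Petr_and_Palindromes.py | solve
-- ===== SOURCE A (Python) =====
-- from bisect import bisect_left, bisect_right
--
-- def solve(N, K, A):
--     if K == 1: return 0
--
--     pos = [{}, {}]
--     for i, a in enumerate(A):
--         p = i % 2
--         if a not in pos[p]: pos[p][a] = []
--         pos[p][a].append(i)
--
--     res = (N - K + 1) * (K // 2)
--     for mp in pos:
--         for a, p in mp.items():
--             for i in p:
--                 l = bisect_left(p, max(i + 1, K - i - 1))
--                 r = bisect_right(p, min(K + i - 1, 2 * N - K - i)) - 1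
--                 if l <= r: res -= r - l + 1
--     return res
-- ===== SOURCE B (Python) =====
-- def solve(N, K, A):
--     if K == 1: return 0
--     n = len(A)
--     res = (N - K + 1) * (K // 2)
--     for i in range(n):
--         for d in range(2, K, 2):
--             j = i + d
--             if j >= n: break
--             if A[i] == A[j] and K - 1 <= i + j <= 2 * N - K:
--                 res -= 1
--     return res
-- ===== Notes on version B (the rewrite author's own statement) =====
-- stated objective: simpler
-- what changed: Replaced A's per-parity/per-value dicts of index lists with bisect window queries by a direct nested scan over each smaller index i and each even gap d in range(2, K, 2), subtracting 1 per equal-valued pair inside the K-1 <= i+j <= 2*N-K window.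
import Mathlib
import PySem

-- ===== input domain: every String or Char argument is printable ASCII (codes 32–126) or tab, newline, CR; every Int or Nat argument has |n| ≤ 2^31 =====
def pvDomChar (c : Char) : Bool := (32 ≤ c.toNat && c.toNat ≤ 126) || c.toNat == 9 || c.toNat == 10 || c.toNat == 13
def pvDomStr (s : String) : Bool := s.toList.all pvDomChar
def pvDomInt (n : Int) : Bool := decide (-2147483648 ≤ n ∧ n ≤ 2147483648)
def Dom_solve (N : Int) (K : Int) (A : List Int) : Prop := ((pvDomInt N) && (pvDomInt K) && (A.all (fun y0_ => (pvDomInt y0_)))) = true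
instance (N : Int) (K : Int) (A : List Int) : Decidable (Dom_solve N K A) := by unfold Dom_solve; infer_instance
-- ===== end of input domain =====

-- B replaces A's per-parity/per-value dict of index lists and bisect window counting by a
-- direct nested scan over index pairs at even gaps (objective: simpler; same results, O(N*K) vs A's O(N log N)).

-- ===== PORT A =====
def solve (N : Int) (K : Int) (A : List Int) : Int :=
  if K == 1 then 0
  else
    let pos := (PySem.List.enumerate A).foldl
      (fun (pos : PySem.Dict Int (List Int) × PySem.Dict Int (List Int)) ia =>
        if PySem.Int.mod ia.1 2 == 0 then
          (pos.1.modify ia.2 [] (· ++ [ia.1]), pos.2)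
        else
          (pos.1, pos.2.modify ia.2 [] (· ++ [ia.1])))
      (PySem.Dict.empty, PySem.Dict.empty)
    let res := (N - K + 1) * (PySem.Int.floordiv K 2)
    [pos.1, pos.2].foldl (fun res mp =>
      mp.items.foldl (fun res ap =>
        ap.2.foldl (fun res i =>
          let l := (PySem.List.bisectLeft ap.2 (max (i + 1) (K - i - 1)) : Int)
          let r := (PySem.List.bisectRight ap.2 (min (K + i - 1) (2 * N - K - i)) : Int) - 1
          if l ≤ r then res - (r - l + 1) else res) res) res) res

-- ===== PORT B =====
-- inner loop of Source B: 'for d in range(2, K, 2): j = i + d; if j >= n: break; …'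
-- (range(2, K, 2) rendered lazily, as Python iterates it: d runs 2, 4, … while d < K)
def altInner (A : List Int) (N K n i : Int) (d : Int) (res : Int) : Int :=
  if d < K then
    let j := i + d
    if j ≥ n then res
    else if PySem.List.pyGetD A i 0 == PySem.List.pyGetD A j 0
            && decide (K - 1 ≤ i + j) && decide (i + j ≤ 2 * N - K) then
      altInner A N K n i (d + 2) (res - 1)
    else
      altInner A N K n i (d + 2) res
  else res
termination_by (K - d).toNat
decreasing_by all_goals omega

def solve_alt (N : Int) (K : Int) (A : List Int) : Int :=
  if K == 1 then 0
  else
    let n : Int := (A.length : Int)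
    (PySem.List.pyRange 0 n 1).foldl
      (fun res i => altInner A N K n i 2 res)
      ((N - K + 1) * (PySem.Int.floordiv K 2))

-- ===== PRECONDITION & SPEC =====
def Spec_solve (N : Int) (K : Int) (A : List Int) (out : Int) : Prop := out = solve_alt N K A
instance (N : Int) (K : Int) (A : List Int) (out : Int) : Decidable (Spec_solve N K A out) := by unfold Spec_solve; infer_instance

-- ===== CLAIM (what is proved, stated in full; the proofs are below) =====
def Claim_equal_solve : Prop := ∀ (N : Int) (K : Int) (A : List Int), Dom_solve N K A → Spec_solve N K A (solve N K A)

-- ===== LEMMAS AND PROOFS =====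

-- the common middle form: both programs equal res0 minus the number of pairs (t, j), t < j,
-- of equal values at an even gap ≤ K-1 with K-1 ≤ t+j ≤ 2N-K, counted at the smaller index t.
def condB (N K : Int) (A : List Int) (t j : Nat) : Bool :=
  decide (A.getD j 0 = A.getD t 0) && decide (j % 2 = t % 2) && decide (t < j) &&
    decide (K - 1 ≤ (t : Int) + (j : Int)) && decide ((j : Int) - (t : Int) ≤ K - 1) &&
    decide ((t : Int) + (j : Int) ≤ 2 * N - K)

def cnt (N K : Int) (A : List Int) (t : Nat) : Int :=
  ((List.range A.length).countP (condB N K A t) : Int)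

def mid (N K : Int) (A : List Int) : Int :=
  (N - K + 1) * (PySem.Int.floordiv K 2) - ((List.range A.length).map (cnt N K A)).sum

-- generic helpers
theorem foldl_sub {β : Type} (l : List β) (g : β → Int) (r : Int) :
    l.foldl (fun r x => r - g x) r = r - (l.map g).sum := by
  induction l generalizing r with
  | nil => simp
  | cons x xs ih => simp [List.foldl_cons, ih]; ring

theorem sum_filter_split (L : List Nat) (p : Nat → Bool) (f : Nat → Int) :
    ((L.filter p).map f).sum + ((L.filter (fun t => !p t)).map f).sum = (L.map f).sum := by
  induction L with
  | nil => simp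
  | cons x xs ih =>
    by_cases h : p x <;> simp [h] <;> omega

theorem group_sum (L : List Nat) (g : Nat → Int) (f : Nat → Int) (ks : List Int)
    (hnd : ks.Nodup) (hcov : ∀ t ∈ L, g t ∈ ks) :
    (ks.map (fun a => ((L.filter (fun t => g t == a)).map f).sum)).sum = (L.map f).sum := by
  induction ks generalizing L with
  | nil =>
    have : L = [] := by
      cases L with
      | nil => rfl
      | cons x xs => exact absurd (hcov x (by simp)) (by simp)
    simp [this]
  | cons a ks' ih =>
    have hsplit := sum_filter_split L (fun t => g t == a) f
    have hrest : ∀ a' ∈ ks', (L.filter (fun t => g t == a')) =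
        ((L.filter (fun t => !(g t == a))).filter (fun t => g t == a')) := by
      intro a' ha'
      rw [List.filter_filter]
      apply List.filter_congr
      intro t _
      by_cases h : g t = a'
      · have : g t ≠ a := by
          rintro rfl
          exact (List.nodup_cons.mp hnd).1 (h ▸ ha')
        have hfa : (g t == a) = false := by simpa using this
        simp [h]
        rintro rfl; exact this h
      · simp [h]
    have hih := ih (L.filter (fun t => !(g t == a))) (List.nodup_cons.mp hnd).2 (by
      intro t ht
      rcases List.mem_cons.mp (hcov t (List.mem_of_mem_filter ht)) with h | h
      · exfalso; simp_all
      · exact h)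
    calc (List.map (fun a => ((L.filter (fun t => g t == a)).map f).sum) (a :: ks')).sum
        = ((L.filter (fun t => g t == a)).map f).sum
          + (ks'.map (fun a' => ((L.filter (fun t => g t == a')).map f).sum)).sum := by simp
      _ = ((L.filter (fun t => g t == a)).map f).sum
          + (ks'.map (fun a' => (((L.filter (fun t => !(g t == a))).filter (fun t => g t == a')).map f).sum)).sum := by
            congr 1
            apply congrArg
            exact List.map_congr_left (fun a' ha' => by rw [hrest a' ha'])
      _ = _ := by rw [hih, hsplit]

-- bisect on a sorted list counts the elements below its argument
theorem count_of_prefix (p : List Int) (q : Int → Bool) (m : Nat) (hm : m ≤ p.length)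
    (h : ∀ j (hj : j < p.length), q p[j] ↔ j < m) : p.countP q = m := by
  induction p generalizing m with
  | nil => simp only [List.countP_nil]; simp at hm; omega
  | cons x xs ih =>
    rw [List.countP_cons]
    cases m with
    | zero =>
      have hx : ¬ q x := by simpa using (h 0 (by simp)).not.mpr (by omega)
      have : xs.countP q = 0 := by
        rw [List.countP_eq_zero]
        intro a ha
        obtain ⟨k, hk, rfl⟩ := List.getElem_of_mem ha
        simpa using (h (k+1) (by simpa using Nat.succ_lt_succ hk)).not.mpr (by omega)
      simp [this, hx]
    | succ m' =>
      have hx : q x := by simpa using (h 0 (by simp)).mpr (by omega)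
      have := ih m' (by simpa using hm) (fun j hj => by
        have := h (j+1) (by simpa using Nat.succ_lt_succ hj)
        simpa [Nat.succ_lt_succ_iff] using this)
      simp [hx, this]

theorem bisectLeft_eq_countP (p : List Int) (hp : p.Pairwise (· ≤ ·)) (x : Int) :
    PySem.List.bisectLeft p x = p.countP (fun y => decide (y < x)) := by
  obtain ⟨h1, h2, h3⟩ := PySem.List.bisectLeft_spec p x hp
  refine (count_of_prefix p _ _ h1 ?_).symm
  intro j hj
  constructor
  · intro hq
    by_contra hlt
    have := h3 j hj (by omega)
    simp at hq; omega
  · intro hlt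
    simpa using h2 j hj hlt

theorem bisectRight_eq_countP (p : List Int) (hp : p.Pairwise (· ≤ ·)) (x : Int) :
    PySem.List.bisectRight p x = p.countP (fun y => decide (y ≤ x)) := by
  obtain ⟨h1, h2, h3⟩ := PySem.List.bisectRight_spec p x hp
  refine (count_of_prefix p _ _ h1 ?_).symm
  intro j hj
  constructor
  · intro hq
    by_contra hlt
    have := h3 j hj (by omega)
    simp at hq; omega
  · intro hlt
    simpa using h2 j hj hlt

theorem betw_aux (p : List Int) (L R : Int) (h : L ≤ R + 1) :
    p.countP (fun x => decide (L ≤ x) && decide (x ≤ R)) + p.countP (fun x => decide (x < L))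
      = p.countP (fun x => decide (x ≤ R)) := by
  induction p with
  | nil => simp
  | cons x xs ih =>
    simp only [List.countP_cons]
    by_cases h1 : L ≤ x <;> by_cases h2 : x ≤ R <;>
      simp [h1, h2, show x < L ↔ ¬ L ≤ x by omega] <;> omega

-- A's window subtraction "if l <= r: res -= r - l + 1" is the count of list elements in [L, R]
theorem amt_eq (p : List Int) (L R : Int) :
    (if (p.countP (fun y => decide (y < L)) : Int) ≤ (p.countP (fun y => decide (y ≤ R)) : Int) - 1
     then ((p.countP (fun y => decide (y ≤ R)) : Int) - 1) - (p.countP (fun y => decide (y < L)) : Int) + 1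
     else 0)
    = (p.countP (fun y => decide (L ≤ y) && decide (y ≤ R)) : Int) := by
  by_cases h : L ≤ R + 1
  · have := betw_aux p L R h
    split <;> omega
  · have h0 : p.countP (fun y => decide (L ≤ y) && decide (y ≤ R)) = 0 := by
      rw [List.countP_eq_zero]; intro a _; simp; omega
    have h1 : p.countP (fun y => decide (y ≤ R)) ≤ p.countP (fun y => decide (y < L)) := by
      apply List.countP_mono_left; intro a _; simp; omega
    split <;> omega

-- ===== B side =====
def qB (N K : Int) (A : List Int) (n i d : Int) : Bool :=
  !decide (i + d ≥ n) &&
    (PySem.List.pyGetD A i 0 == PySem.List.pyGetD A (i + d) 0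
      && decide (K - 1 ≤ i + (i + d)) && decide (i + (i + d) ≤ 2 * N - K))

-- the break in B's inner loop: past it every later gap also fails, so the loop counts qB
-- over the gaps range(2, K, 2)
theorem pyRange2_nil (K d : Int) (h : ¬ d < K) : PySem.List.pyRange d K 2 = [] := by
  rw [PySem.List.pyRange_of_pos d K (by norm_num)]
  rw [if_neg (by omega)]
  simp

theorem pyRange2_cons (K d : Int) (h : d < K) :
    PySem.List.pyRange d K 2 = d :: PySem.List.pyRange (d + 2) K 2 := by
  rw [PySem.List.pyRange_of_pos d K (by norm_num), PySem.List.pyRange_of_pos (d+2) K (by norm_num)]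
  rw [if_pos (by omega)]
  have hm : ((K - d + 2 - 1) / 2).toNat = (if d + 2 < K then ((K - (d+2) + 2 - 1) / 2).toNat else 0) + 1 := by
    split <;> omega
  rw [hm, List.range_succ_eq_map, List.map_cons, List.map_map]
  congr 1
  · simp
  · apply List.map_congr_left
    intro k _
    simp [Function.comp]
    ring

theorem altInner_eq (N K n i : Int) (A : List Int) : ∀ (d res : Int),
    altInner A N K n i d res = res - ((PySem.List.pyRange d K 2).countP (qB N K A n i) : Int) := by
  suffices H : ∀ (m : Nat) (d res : Int), (K - d).toNat = m →
      altInner A N K n i d res = res - ((PySem.List.pyRange d K 2).countP (qB N K A n i) : Int) by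
    intro d res; exact H _ d res rfl
  intro m
  induction m using Nat.strong_induction_on with
  | _ m ih =>
    intro d res hm
    unfold altInner
    by_cases hd : d < K
    · rw [if_pos hd, pyRange2_cons K d hd, List.countP_cons]
      by_cases hb : i + d ≥ n
      · rw [if_pos hb]
        have h0 : (PySem.List.pyRange (d + 2) K 2).countP (qB N K A n i) = 0 := by
          rw [List.countP_eq_zero]
          intro d' hd'
          rw [PySem.List.mem_pyRange_iff_of_pos (by norm_num)] at hd'
          simp [qB]
          omega
        have hq : qB N K A n i d = false := by simp [qB]; omega
        simp [h0, hq]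
      · rw [if_neg hb]
        have hrec := ih ((K - (d + 2)).toNat) (by omega) (d + 2)
        by_cases hc : (PySem.List.pyGetD A i 0 == PySem.List.pyGetD A (i + d) 0
            && decide (K - 1 ≤ i + (i + d)) && decide (i + (i + d) ≤ 2 * N - K)) = true
        · rw [if_pos hc, hrec _ rfl]
          have hq : qB N K A n i d = true := by simp [qB] at *; exact ⟨by omega, hc⟩
          rw [hq]
          simp
          ring
        · rw [if_neg hc, hrec _ rfl]
          have hq : qB N K A n i d = false := by simp only [qB, hc, Bool.and_false]
          rw [hq]
          simp
    · rw [if_neg hd, pyRange2_nil K d hd]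
      simp

theorem pyRange2_nodup (K : Int) : (PySem.List.pyRange 2 K 2).Nodup := by
  rw [PySem.List.pyRange_of_pos 2 K (by norm_num)]
  exact (List.nodup_range).map_on (by intro x _ y _ h; omega)

-- B's gap loop at smaller index t counts exactly the condB-partners of t (bijection j = t + d)
theorem countB_eq_cnt (N K : Int) (A : List Int) (t : Nat) (_ht : t < A.length) :
    ((PySem.List.pyRange 2 K 2).countP (qB N K A (A.length : Int) (t : Int)) : Int) = cnt N K A t := by
  unfold cnt
  congr 1
  rw [List.countP_eq_length_filter, List.countP_eq_length_filter]
  have hperm : (((PySem.List.pyRange 2 K 2).filter (qB N K A (A.length : Int) (t : Int))).map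
      (fun d => ((t : Int) + d).toNat)).Perm ((List.range A.length).filter (condB N K A t)) := by
    rw [List.perm_ext_iff_of_nodup]
    · intro j
      simp only [List.mem_map, List.mem_filter, List.mem_range,
        PySem.List.mem_pyRange_iff_of_pos (show (0:Int) < 2 by norm_num)]
      constructor
      · rintro ⟨d, ⟨⟨hd2, hdK, hdvd⟩, hq⟩, rfl⟩
        simp only [qB, Bool.and_eq_true, Bool.not_eq_eq_eq_not, Bool.not_true, decide_eq_false_iff_not,
          decide_eq_true_eq, beq_iff_eq] at hq
        obtain ⟨hlt, ⟨⟨hval, hlo⟩, hhi⟩⟩ := hq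
        have hj : ((t : Int) + d).toNat < A.length := by omega
        refine ⟨hj, ?_⟩
        simp only [condB, Bool.and_eq_true, decide_eq_true_eq]
        have hcast : ((((t : Int) + d).toNat : Int)) = (t : Int) + d := by omega
        have hval' : A.getD (((t : Int) + d).toNat) 0 = A.getD t 0 := by
          have h1 := PySem.List.pyGetD_natCast (xs := A) (n := t) (d := (0:Int))
          have h2 := PySem.List.pyGetD_natCast (xs := A) (n := ((t : Int) + d).toNat) (d := (0:Int))
          rw [← h1, ← h2, hcast]
          exact hval.symm
        refine ⟨⟨⟨⟨⟨hval', by omega⟩, by omega⟩, by omega⟩, by omega⟩, by omega⟩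
      · rintro ⟨hj, hcond⟩
        simp only [condB, Bool.and_eq_true, decide_eq_true_eq] at hcond
        obtain ⟨⟨⟨⟨⟨hval, hpar⟩, htj⟩, hlo⟩, hhi⟩, hhi2⟩ := hcond
        refine ⟨(j : Int) - (t : Int), ⟨⟨by omega, by omega, by omega⟩, ?_⟩, by omega⟩
        simp only [qB, Bool.and_eq_true, Bool.not_eq_eq_eq_not, Bool.not_true, decide_eq_false_iff_not,
          decide_eq_true_eq, beq_iff_eq]
        have hcast : (t : Int) + ((j : Int) - (t : Int)) = (j : Int) := by ring
        rw [hcast]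
        refine ⟨by omega, ⟨⟨?_, by omega⟩, by omega⟩⟩
        have h1 := PySem.List.pyGetD_natCast (xs := A) (n := t) (d := (0:Int))
        have h2 := PySem.List.pyGetD_natCast (xs := A) (n := j) (d := (0:Int))
        rw [h1, h2]
        exact hval.symm
    · apply List.Nodup.map_on
      · intro x hx y hy hxy
        simp only [List.mem_filter, PySem.List.mem_pyRange_iff_of_pos (show (0:Int) < 2 by norm_num)] at hx hy
        omega
      · exact (pyRange2_nodup K).filter _
    · exact (List.nodup_range).filter _
  calc ((PySem.List.pyRange 2 K 2).filter (qB N K A (A.length : Int) (t : Int))).length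
      = (((PySem.List.pyRange 2 K 2).filter (qB N K A (A.length : Int) (t : Int))).map
          (fun d => ((t : Int) + d).toNat)).length := by rw [List.length_map]
    _ = _ := hperm.length_eq

theorem B_eq (N K : Int) (A : List Int) (hK : (K == 1) = false) :
    solve_alt N K A = mid N K A := by
  unfold solve_alt
  simp only [hK, Bool.false_eq_true, if_false]
  rw [show PySem.List.pyRange 0 ((A.length : Int)) 1 = PySem.List.pyRange 0 ((A.length : Int)) from rfl]
  rw [PySem.List.pyRange_zero_nat, List.foldl_map]
  rw [PySem.List.foldl_congr_mem _ _ (fun res t => res - cnt N K A t) _ (by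
    intro acc t htm
    rw [altInner_eq N K _ _ A 2 acc,
      countB_eq_cnt N K A t (by simpa using htm)])]
  rw [foldl_sub]
  rfl

-- ===== A side =====
def buildD (l : List (Int × Int)) (d : PySem.Dict Int (List Int)) : PySem.Dict Int (List Int) :=
  l.foldl (fun d q => d.modify q.2 [] (· ++ [q.1])) d

def LBl (A : List Int) (b : Nat) : List Nat := (List.range A.length).filter (fun t => t % 2 == b)

def lsb (A : List Int) (b : Nat) : List (Int × Int) :=
  (LBl A b).map (fun (t : Nat) => ((t : Int), A.getD t 0))

def grp (A : List Int) (b : Nat) (a : Int) : List Int :=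
  ((LBl A b).filter (fun t => A.getD t 0 == a)).map (fun (t : Nat) => (t : Int))

-- A's dict-building loop splits into one value-keyed index-list dict per parity
theorem pos_split (l : List (Int × Int)) (d0 d1 : PySem.Dict Int (List Int)) :
    l.foldl (fun (pos : PySem.Dict Int (List Int) × PySem.Dict Int (List Int)) ia =>
        if PySem.Int.mod ia.1 2 == 0 then
          (pos.1.modify ia.2 [] (· ++ [ia.1]), pos.2)
        else
          (pos.1, pos.2.modify ia.2 [] (· ++ [ia.1]))) (d0, d1)
      = (buildD (l.filter (fun q => PySem.Int.mod q.1 2 == 0)) d0,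
         buildD (l.filter (fun q => !(PySem.Int.mod q.1 2 == 0))) d1) := by
  induction l generalizing d0 d1 with
  | nil => simp [buildD]
  | cons q l ih =>
    rw [List.foldl_cons]
    by_cases h : (PySem.Int.mod q.1 2 == 0) = true
    · rw [if_pos h]
      rw [List.filter_cons_of_pos (l := l) h,
        List.filter_cons_of_neg (l := l) (p := fun q => !(PySem.Int.mod q.1 2 == 0)) (by simp only [h, Bool.not_true]; simp),
        show ∀ d : PySem.Dict Int (List Int), buildD (q :: List.filter (fun q => PySem.Int.mod q.1 2 == 0) l) d
          = buildD (List.filter (fun q => PySem.Int.mod q.1 2 == 0) l) (d.modify q.2 [] (· ++ [q.1]))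
          from fun _ => rfl]
      exact ih _ _
    · rw [if_neg h]
      rw [List.filter_cons_of_neg (l := l) (p := fun q => PySem.Int.mod q.1 2 == 0) h,
        List.filter_cons_of_pos (l := l) (p := fun q => !(PySem.Int.mod q.1 2 == 0)) (by simp only [Bool.not_eq_true']; simpa using h),
        show ∀ d : PySem.Dict Int (List Int), buildD (q :: List.filter (fun q => !(PySem.Int.mod q.1 2 == 0)) l) d
          = buildD (List.filter (fun q => !(PySem.Int.mod q.1 2 == 0)) l) (d.modify q.2 [] (· ++ [q.1]))
          from fun _ => rfl]
      exact ih _ _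

theorem mod2_cast (t : Nat) : PySem.Int.mod (t : Int) 2 = ((t % 2 : Nat) : Int) := by
  exact_mod_cast PySem.Int.mod_natCast t 2

theorem enum_eq (A : List Int) :
    PySem.List.enumerate A = (List.range A.length).map (fun (t : Nat) => ((t : Int), A.getD t 0)) := by
  rw [PySem.List.enumerate_eq_map_pyRange A 0]
  rw [show PySem.List.len A = (A.length : Int) from by simp [PySem.List.len]]
  rw [PySem.List.pyRange_zero_nat, List.map_map]
  apply List.map_congr_left
  intro t _
  simp [Function.comp, PySem.List.pyGetD_natCast]

theorem enum_filter_even (A : List Int) :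
    (PySem.List.enumerate A).filter (fun q => PySem.Int.mod q.1 2 == 0) = lsb A 0 := by
  rw [enum_eq, List.filter_map]
  unfold lsb LBl
  congr 1
  apply List.filter_congr
  intro t _
  simp only [Function.comp, mod2_cast]
  rcases Nat.mod_two_eq_zero_or_one t with h | h <;> simp [h]

theorem enum_filter_odd (A : List Int) :
    (PySem.List.enumerate A).filter (fun q => !(PySem.Int.mod q.1 2 == 0)) = lsb A 1 := by
  rw [enum_eq, List.filter_map]
  unfold lsb LBl
  congr 1
  apply List.filter_congr
  intro t _
  simp only [Function.comp, mod2_cast]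
  rcases Nat.mod_two_eq_zero_or_one t with h | h <;> simp [h]

-- the dict's value at key a is the increasing list of same-parity indices holding value a
theorem buildD_getD (A : List Int) (b : Nat) (a : Int) :
    (buildD (lsb A b) PySem.Dict.empty).getD a [] = grp A b a := by
  unfold buildD lsb grp
  rw [show ((LBl A b).map (fun (t : Nat) => ((t : Int), A.getD t 0))) =
      (((LBl A b).map (fun (t : Nat) => (A.getD t 0, (t : Int)))).map Prod.swap) from by
    rw [List.map_map]; rfl]
  rw [List.foldl_map]
  have h := PySem.Dict.getD_foldl_modify_append
    ((LBl A b).map (fun (t : Nat) => (A.getD t 0, (t : Int)))) (PySem.Dict.empty) a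
  simp only [Prod.swap] at h ⊢
  rw [h]
  rw [PySem.Dict.getD_empty, List.nil_append, List.filter_map, List.map_map]
  rfl

theorem buildD_keys (A : List Int) (b : Nat) :
    (buildD (lsb A b) PySem.Dict.empty).keys
      = PySem.Set.ofList ((LBl A b).map (fun (t : Nat) => A.getD t 0)) := by
  unfold buildD lsb
  have h := PySem.Dict.keys_foldl_modify_key
    ((LBl A b).map (fun (t : Nat) => ((t : Int), A.getD t 0))) (fun q => q.2) []
    (fun d q => (· ++ [q.1])) (PySem.Dict.empty)
  rw [h, List.map_map]
  simp [PySem.Dict.keys]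
  rfl

theorem buildD_nodup (A : List Int) (b : Nat) :
    (buildD (lsb A b) PySem.Dict.empty).keys.Nodup := by
  unfold buildD
  exact PySem.Dict.nodup_keys_foldl_modify_key (lsb A b) (fun q => q.2) []
    (fun d q => (· ++ [q.1])) PySem.Dict.empty PySem.Dict.nodup_keys_empty

theorem grp_pairwise (A : List Int) (b : Nat) (a : Int) : (grp A b a).Pairwise (· ≤ ·) := by
  unfold grp
  exact (((List.pairwise_lt_range).filter _).filter _).map _ (by intro x y h; omega)

theorem mem_LBl (A : List Int) (b t : Nat) : t ∈ LBl A b ↔ t < A.length ∧ t % 2 = b := by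
  simp [LBl]

-- counting the same-parity same-value partners of t inside A's window [L, R] is cnt
theorem grp_count (N K : Int) (A : List Int) (b : Nat) (a : Int) (t : Nat)
    (_ht : t < A.length) (htb : t % 2 = b) (hta : A.getD t 0 = a) :
    ((grp A b a).countP (fun y => decide (max ((t : Int) + 1) (K - (t : Int) - 1) ≤ y)
        && decide (y ≤ min (K + (t : Int) - 1) (2 * N - K - (t : Int)))) : Nat)
      = (List.range A.length).countP (condB N K A t) := by
  unfold grp LBl
  rw [List.countP_map, List.countP_filter, List.countP_filter]
  apply List.countP_congr
  intro j hj
  rw [List.mem_range] at hj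
  simp only [Function.comp, condB, Bool.and_eq_true, decide_eq_true_eq, beq_iff_eq]
  constructor
  · rintro ⟨⟨⟨hlo, hhi⟩, hval⟩, hpar⟩
    exact ⟨⟨⟨⟨⟨by rw [hval, hta], by omega⟩, by omega⟩, by omega⟩, by omega⟩, by omega⟩
  · rintro ⟨⟨⟨⟨⟨hval, hpar⟩, htj⟩, hlo⟩, hhi⟩, hhi2⟩
    exact ⟨⟨⟨by omega, by omega⟩, by rw [hval, hta]⟩, by omega⟩

-- A's whole loop over one parity dict subtracts cnt t for every index t of that parity
theorem dictLoop_sum (N K : Int) (A : List Int) (b : Nat) (res : Int) :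
    (buildD (lsb A b) PySem.Dict.empty).items.foldl (fun res ap =>
        ap.2.foldl (fun res i =>
          let l := (PySem.List.bisectLeft ap.2 (max (i + 1) (K - i - 1)) : Int)
          let r := (PySem.List.bisectRight ap.2 (min (K + i - 1) (2 * N - K - i)) : Int) - 1
          if l ≤ r then res - (r - l + 1) else res) res) res
      = res - ((LBl A b).map (cnt N K A)).sum := by
  rw [PySem.Dict.items_eq_map_keys _ (buildD_nodup A b) [], List.foldl_map]
  rw [PySem.List.foldl_congr_mem _ _
    (fun res a => res - (((LBl A b).filter (fun t => A.getD t 0 == a)).map (cnt N K A)).sum) _ (by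
      intro acc a ha
      simp only
      rw [buildD_getD]
      rw [PySem.List.foldl_congr_mem _ _ (fun res (i : Int) => res - cnt N K A i.toNat) _ (by
        intro acc' i hi
        unfold grp at hi
        rw [List.mem_map] at hi
        obtain ⟨t, htm, rfl⟩ := hi
        rw [List.mem_filter] at htm
        obtain ⟨htl, hval⟩ := htm
        rw [mem_LBl] at htl
        simp only
        rw [show ∀ x y : Int, (if (x : Int) ≤ y - 1 then acc' - (y - 1 - x + 1) else acc')
            = acc' - (if (x : Int) ≤ y - 1 then (y - 1) - x + 1 else 0) from by
          intro x y; split_ifs <;> ring]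
        congr 1
        rw [bisectLeft_eq_countP _ (grp_pairwise A b a), bisectRight_eq_countP _ (grp_pairwise A b a)]
        rw [amt_eq (grp A b a) (max ((t : Int) + 1) (K - (t : Int) - 1))
          (min (K + (t : Int) - 1) (2 * N - K - (t : Int)))]
        rw [grp_count N K A b a t htl.1 htl.2 (by simpa using hval)]
        simp [cnt])]
      rw [foldl_sub]
      congr 1
      unfold grp
      rw [List.map_map]
      congr 1)]
  rw [foldl_sub]
  congr 1
  rw [buildD_keys]
  refine group_sum (LBl A b) (fun (t : Nat) => A.getD t 0) (cnt N K A) _ (PySem.Set.nodup_ofList _) ?_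
  intro t ht
  rw [PySem.Set.mem_ofList]
  exact List.mem_map_of_mem ht

theorem A_eq (N K : Int) (A : List Int) (hK : (K == 1) = false) :
    solve N K A = mid N K A := by
  unfold solve
  simp only [hK, Bool.false_eq_true, if_false]
  rw [pos_split]
  rw [enum_filter_even, enum_filter_odd]
  simp only [List.foldl_cons, List.foldl_nil]
  rw [dictLoop_sum, dictLoop_sum]
  unfold mid
  have h2 := sum_filter_split (List.range A.length) (fun t => t % 2 == 0) (cnt N K A)
  have h0 : LBl A 0 = (List.range A.length).filter (fun t => t % 2 == 0) := rfl
  have h1 : LBl A 1 = (List.range A.length).filter (fun t => !(t % 2 == 0)) := by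
    unfold LBl
    apply List.filter_congr
    intro t _
    rcases Nat.mod_two_eq_zero_or_one t with h | h <;> simp [h]
  rw [h0, h1]
  omega

-- ===== VERDICT (by name: the statement is the Claim_ definition above) =====
theorem solve_spec : Claim_equal_solve := by
  intro N K A _
  unfold Spec_solve
  by_cases hK : K = 1
  · subst hK; simp [solve, solve_alt]
  · rw [A_eq N K A (by simpa using hK), B_eq N K A (by simpa using hK)]
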